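-- pv_equiv track=rewrite | github.com/AlexFiliakov/iQuest | src/analytics/data_story_generator.py | adjust
-- ===== SOURCE A (Python) =====
-- def adjust(content: str, section_type: str) -> str:
--     """Apply encouraging tone to content."""
--     if not content:
--         return content
--
--     # Replace neutral phrases with encouraging ones
--     replacements = {
--         "didn't meet": "came close to meeting",
--         "failed to": "had opportunity to",
--         "decreased": "had room for growth",
--         "worse than": "different from",
--         "below average": "building momentum",
--         "no improvement": "maintaining baseline",
--         "declined": "experienced variation"
--     }
--
--     adjusted = content
--     for neutral, encouraging in replacements.items():
--         adjusted = adjusted.replace(neutral, encouraging)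
--
--     # Add encouraging phrases to closing
--     if section_type == 'closing' and not adjusted.endswith('!'):
--         adjusted += " Keep up the great work - every step counts!"
--
--     return adjusted
-- ===== SOURCE B (Python) =====
-- _RULES = [
--     ("didn't meet", "came close to meeting"),
--     ("failed to", "had opportunity to"),
--     ("decreased", "had room for growth"),
--     ("worse than", "different from"),
--     ("below average", "building momentum"),
--     ("no improvement", "maintaining baseline"),
--     ("declined", "experienced variation"),
-- ]
--
--
-- def _apply(s, rules):
--     """Apply each phrase substitution in turn, scanning with find and an accumulator."""
--     if not rules:
--         return s
--     k, v = rules[0]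
--     parts = []
--     i = 0
--     while (j := s.find(k, i)) >= 0:
--         parts.append(s[i:j])
--         parts.append(v)
--         i = j + len(k)
--     parts.append(s[i:])
--     return _apply("".join(parts), rules[1:])
--
--
-- def adjust(content: str, section_type: str) -> str:
--     """Apply encouraging tone to content."""
--     if not content:
--         return content
--
--     adjusted = _apply(content, _RULES)
--
--     if section_type == 'closing' and not adjusted.endswith('!'):
--         adjusted += " Keep up the great work - every step counts!"
--
--     return adjusted
-- ===== Notes on version B (the rewrite author's own statement) =====
-- stated objective: alternative
-- what changed: B recurses over the phrase list and performs each substitution with an explicit find/accumulate scan (s.find with a moving start index, slice parts collected and joined) instead of A's for-loop of builtin str.replace calls; the empty-content guard and closing-suffix branch are kept.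
import Mathlib
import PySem

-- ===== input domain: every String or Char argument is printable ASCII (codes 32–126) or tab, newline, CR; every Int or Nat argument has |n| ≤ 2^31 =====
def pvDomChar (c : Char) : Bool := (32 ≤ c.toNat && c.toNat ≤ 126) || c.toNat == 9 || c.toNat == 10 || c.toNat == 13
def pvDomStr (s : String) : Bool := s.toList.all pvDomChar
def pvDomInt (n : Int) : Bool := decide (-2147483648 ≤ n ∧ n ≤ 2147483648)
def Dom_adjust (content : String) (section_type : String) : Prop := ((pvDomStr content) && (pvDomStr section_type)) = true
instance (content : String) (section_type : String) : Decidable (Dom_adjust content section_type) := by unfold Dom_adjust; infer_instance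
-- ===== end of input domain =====

-- B replaces A's for-loop of builtin str.replace calls by a recursion over the
-- phrase list whose substitution is an explicit find/accumulate scan (objective:
-- alternative decomposition, same cost).

-- ===== PORT A =====
def adjust (content : String) (section_type : String) : String :=
  if content = "" then content
  else
    let replacements : List (String × String) :=
      [("didn't meet", "came close to meeting"),
       ("failed to", "had opportunity to"),
       ("decreased", "had room for growth"),
       ("worse than", "different from"),
       ("below average", "building momentum"),
       ("no improvement", "maintaining baseline"),
       ("declined", "experienced variation")]
    let adjusted := replacements.foldl (fun adj kv => PySem.Str.replace adj kv.1 kv.2) content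
    if section_type == "closing" && !(PySem.Str.endswith adjusted "!") then
      adjusted ++ " Keep up the great work - every step counts!"
    else adjusted

-- ===== PORT B =====
def pvRuleList : List (String × String) :=
  [("didn't meet", "came close to meeting"),
   ("failed to", "had opportunity to"),
   ("decreased", "had room for growth"),
   ("worse than", "different from"),
   ("below average", "building momentum"),
   ("no improvement", "maintaining baseline"),
   ("declined", "experienced variation")]

-- Source B's while loop «while (j := s.find(k, i)) >= 0: parts.append(s[i:j]); parts.append(v);
-- i = j + len(k)» followed by «parts.append(s[i:]); ''.join(parts)».  The parts are
-- accumulated already joined (acc is the concatenation of the parts emitted so far, in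
-- order — exactly what ''.join produces); the loop becomes structural fuel recursion
-- (fuel = len(s)+1 bounds the iteration count since i strictly increases).
def pvSubGo (k v s : List Char) (fuel : Nat) (i : Nat) (acc : List Char) : List Char :=
  match fuel with
  | 0 => acc ++ s.drop i
  | fuel+1 =>
    let j := PySem.Chars.findFrom s k (i : Int)
    if j < 0 then acc ++ s.drop i
    else pvSubGo k v s fuel (j.toNat + k.length)
      (acc ++ PySem.List.slice s (some (i : Int)) (some j) ++ v)

def pvApply (s : List Char) (rules : List (String × String)) : List Char :=
  match rules with
  | [] => s
  | (k, v) :: rest => pvApply (pvSubGo k.toList v.toList s (s.length + 1) 0 []) rest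

def adjust_alt (content : String) (section_type : String) : String :=
  if content = "" then content
  else
    let adjusted := String.ofList (pvApply content.toList pvRuleList)
    if section_type == "closing" && !(PySem.Str.endswith adjusted "!") then
      adjusted ++ " Keep up the great work - every step counts!"
    else adjusted

-- ===== PRECONDITION & SPEC =====
def Spec_adjust (content : String) (section_type : String) (out : String) : Prop :=
  out = adjust_alt content section_type
instance (content : String) (section_type : String) (out : String) : Decidable (Spec_adjust content section_type out) := by
  unfold Spec_adjust; infer_instance

-- ===== CLAIM =====
def Claim_equal_adjust : Prop := ∀ (content : String) (section_type : String), Dom_adjust content section_type → Spec_adjust content section_type (adjust content section_type)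

-- ===== LEMMAS AND PROOFS =====

-- structural characterization of Python's str.replace scan
def pvRepl (k v : List Char) (s : List Char) : List Char :=
  match s with
  | [] => []
  | c :: t =>
    if k.isPrefixOf (c :: t) then v ++ pvRepl k v (t.drop (k.length - 1))
    else c :: pvRepl k v t
termination_by s.length
decreasing_by all_goals (simp; try omega)

theorem pvRepl_nil (k v : List Char) : pvRepl k v [] = [] := by rw [pvRepl]

theorem pvRepl_cons (k v : List Char) (c : Char) (t : List Char) :
    pvRepl k v (c :: t) =
      if k.isPrefixOf (c :: t) then v ++ pvRepl k v (t.drop (k.length - 1))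
      else c :: pvRepl k v t := by rw [pvRepl]

-- fuel-invariant characterization of PySem.Chars.replace.go
theorem pvGo_eq (old new : List Char) (hold : old ≠ []) :
    ∀ fuel (l acc : List Char), l.length ≤ fuel →
      PySem.Chars.replace.go old new fuel l acc = acc.reverse ++ pvRepl old new l := by
  intro fuel
  induction fuel with
  | zero =>
    intro l acc h
    have : l = [] := by cases l <;> simp_all
    subst this
    simp [PySem.Chars.replace.go, pvRepl_nil]
  | succ n ih =>
    intro l acc h
    cases l with
    | nil => simp [PySem.Chars.replace.go, pvRepl_nil]
    | cons c t =>
      rw [PySem.Chars.replace.go, pvRepl_cons]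
      by_cases hp : old.isPrefixOf (c :: t)
      · rw [if_pos hp, if_pos hp]
        have hlen : (List.drop old.length (c :: t)).length ≤ n := by
          have : 1 ≤ old.length := by cases old <;> simp_all
          simp only [List.length_drop, List.length_cons] at *
          omega
        rw [ih _ _ hlen]
        have hdrop : List.drop old.length (c :: t) = t.drop (old.length - 1) := by
          have h1 : old.length - 1 + 1 = old.length := by
            have : 1 ≤ old.length := by cases old <;> simp_all
            omega
          conv_lhs => rw [← h1]
          rw [List.drop_succ_cons]
        rw [hdrop]
        simp
      · rw [if_neg hp, if_neg hp]
        have hlen : t.length ≤ n := by simp at h; omega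
        rw [ih _ _ hlen]
        simp

theorem pvReplace_eq (s old new : List Char) (hold : old ≠ []) :
    PySem.Chars.replace s old new = pvRepl old new s := by
  rw [PySem.Chars.replace]
  rw [if_neg (by simp [hold])]
  rw [pvGo_eq old new hold s.length s [] le_rfl]
  simp

theorem pvRepl_block (k v : List Char) :
    ∀ b X, (∀ p < b.length, ¬ k <+: (b.drop p ++ X)) →
      pvRepl k v (b ++ X) = b ++ pvRepl k v X := by
  intro b
  induction b with
  | nil => intro X _; simp
  | cons c b' ih =>
    intro X h
    have h0 := h 0 (by simp)
    simp only [List.drop_zero] at h0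
    have hnp : ¬ k.isPrefixOf (c :: (b' ++ X)) = true := by
      rw [List.isPrefixOf_iff_prefix]
      intro hc
      exact h0 (by simpa using hc)
    rw [List.cons_append, pvRepl_cons, if_neg hnp, ih X (fun p hp => by
      have := h (p+1) (by simp; omega)
      simpa using this)]
    simp

theorem pvRepl_hit (k v X : List Char) (hk : k ≠ []) :
    pvRepl k v (k ++ X) = v ++ pvRepl k v X := by
  cases k with
  | nil => exact absurd rfl hk
  | cons a k' =>
    rw [List.cons_append, pvRepl_cons, if_pos]
    · congr 1
      simp only [List.length_cons, Nat.add_sub_cancel]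
      rw [List.drop_left]
    · exact List.isPrefixOf_iff_prefix.mpr (by rw [← List.cons_append]; exact List.prefix_append _ _)

theorem pvRepl_no_occ (k v : List Char) : ∀ u, ¬ k <:+: u → pvRepl k v u = u := by
  intro u
  induction u with
  | nil => intro _; exact pvRepl_nil k v
  | cons c t ih =>
    intro h
    rw [pvRepl_cons, if_neg, ih (fun hi => h (hi.trans (List.suffix_cons c t).isInfix))]
    rw [List.isPrefixOf_iff_prefix]
    exact fun hp => h hp.isInfix

-- the find/accumulate loop computes exactly the str.replace scan
theorem pvSubGo_eq (k v s : List Char) (hk : k ≠ []) :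
    ∀ fuel i acc, i ≤ s.length → s.length - i < fuel →
      pvSubGo k v s fuel i acc = acc ++ pvRepl k v (s.drop i) := by
  intro fuel
  induction fuel with
  | zero => intro i acc _ h; omega
  | succ n ih =>
    intro i acc hi hfuel
    rw [pvSubGo]
    rw [PySem.Chars.findFrom_natCast s k i hi]
    by_cases hno : PySem.Chars.find (s.drop i) k = -1
    · rw [if_pos (by rw [hno]; norm_num)]
      rw [pvRepl_no_occ k v _ ((PySem.Chars.find_eq_neg_one_iff _ _).mp hno)]
    · have hf0 : 0 ≤ PySem.Chars.find (s.drop i) k := by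
        have := PySem.Chars.neg_one_le_find (s.drop i) k
        omega
      have hfle : PySem.Chars.find (s.drop i) k ≤ (s.drop i).length :=
        PySem.Chars.find_le_length _ _
      rw [if_neg hno, if_neg (by omega)]
      set F := (PySem.Chars.find (s.drop i) k).toNat with hF
      have hFle : F ≤ s.length - i := by
        simp only [List.length_drop] at hfle
        omega
      have hspec := PySem.Chars.findFrom_natCast_spec s k i hi (by
        rw [PySem.Chars.findFrom_natCast s k i hi, if_neg hno]
        omega)
      rw [PySem.Chars.findFrom_natCast s k i hi, if_neg hno] at hspec
      obtain ⟨-, hpre, hmin⟩ := hspec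
      have hiF : ((i : Int) + PySem.Chars.find (s.drop i) k).toNat = i + F := by omega
      rw [hiF] at hpre hmin
      have hklen : k.length ≤ s.length - (i + F) := by
        have h1 := hpre.length_le
        simp only [List.length_drop] at h1
        omega
      have hk1 : 1 ≤ k.length := by cases k <;> simp_all
      -- the slice s[i:j] is (s.drop i).take F
      have hslice : PySem.List.slice s (some (i : Int))
          (some ((i : Int) + PySem.Chars.find (s.drop i) k)) = (s.drop i).take F := by
        have : (i : Int) + PySem.Chars.find (s.drop i) k = ((i + F : Nat) : Int) := by
          push_cast; omega
        rw [this]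
        simp [pysem]
      have hulen : F ≤ (s.drop i).length := by
        simp only [List.length_drop]; omega
      have hlenTake : (List.take F (s.drop i)).length = F := by
        simp only [List.length_take]; omega
      have h2 : List.drop F (List.drop i s) = List.drop (i + F) s := by
        rw [List.drop_drop]
      have h3 : List.drop (i + F) s = k ++ List.drop (i + F + k.length) s := by
        have h4 := List.prefix_append_drop hpre
        rw [List.drop_drop] at h4
        exact h4
      -- decompose the remaining text around the found occurrence
      have hdecomp : List.drop i s = List.take F (List.drop i s) ++
          (k ++ List.drop (i + F + k.length) s) := by
        have h1 := (List.take_append_drop F (List.drop i s)).symm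
        rw [h2, h3] at h1
        exact h1
      have hcond : ∀ p < (List.take F (List.drop i s)).length,
          ¬ k <+: ((List.take F (List.drop i s)).drop p ++
            (k ++ List.drop (i + F + k.length) s)) := by
        intro p hp hcon
        rw [hlenTake] at hp
        refine hmin (i + p) (by omega) (by omega) ?_
        have e1 : (List.take F (List.drop i s)).drop p ++
            (k ++ List.drop (i + F + k.length) s) =
            ((List.take F (List.drop i s)) ++ (k ++ List.drop (i + F + k.length) s)).drop p := by
          rw [List.drop_append_of_le_length (by rw [hlenTake]; omega)]
        rw [e1, ← hdecomp, List.drop_drop] at hcon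
        exact hcon
      have hrepl : pvRepl k v (List.drop i s) =
          List.take F (List.drop i s) ++ (v ++ pvRepl k v (List.drop (i + F + k.length) s)) := by
        conv_lhs => rw [hdecomp]
        rw [pvRepl_block k v _ _ hcond, pvRepl_hit _ _ _ hk]
      rw [hiF]
      rw [ih (i + F + k.length) _ (by omega) (by omega), hslice, hrepl]
      simp

theorem pvSub_eq (k v s : List Char) (hk : k ≠ []) :
    pvSubGo k v s (s.length + 1) 0 [] = pvRepl k v s := by
  have := pvSubGo_eq k v s hk (s.length + 1) 0 [] (by omega) (by omega)
  simpa using this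

theorem pvCore_eq (content : String) :
    [("didn't meet", "came close to meeting"),
     ("failed to", "had opportunity to"),
     ("decreased", "had room for growth"),
     ("worse than", "different from"),
     ("below average", "building momentum"),
     ("no improvement", "maintaining baseline"),
     ("declined", "experienced variation")].foldl
       (fun adj (kv : String × String) => PySem.Str.replace adj kv.1 kv.2) content
    = String.ofList (pvApply content.toList pvRuleList) := by
  apply String.toList_inj.mp
  simp only [String.toList_ofList, pvRuleList, pvApply, List.foldl_cons, List.foldl_nil]
  simp only [PySem.Str.toList_replace]
  rw [pvReplace_eq _ _ _ (by decide), pvReplace_eq _ _ _ (by decide),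
    pvReplace_eq _ _ _ (by decide), pvReplace_eq _ _ _ (by decide),
    pvReplace_eq _ _ _ (by decide), pvReplace_eq _ _ _ (by decide),
    pvReplace_eq _ _ _ (by decide)]
  rw [pvSub_eq _ _ _ (by decide), pvSub_eq _ _ _ (by decide), pvSub_eq _ _ _ (by decide),
    pvSub_eq _ _ _ (by decide), pvSub_eq _ _ _ (by decide), pvSub_eq _ _ _ (by decide),
    pvSub_eq _ _ _ (by decide)]

-- ===== VERDICT =====
theorem adjust_spec : Claim_equal_adjust := by
  intro content section_type _
  unfold Spec_adjust adjust adjust_alt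
  by_cases hc : content = ""
  · simp [hc]
  · rw [if_neg hc, if_neg hc]
    have hcore := pvCore_eq content
    simp only [hcore]
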